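-- pv_equiv track=rewrite | github.com/GA1/python-algs | src/algs/ladder.py | ladder_with_modulo
-- ===== SOURCE A (Python) =====
-- def ladder_with_modulo(n, q):
--     fibs = [1, 2]
--     if n == 1:
--         return 1
--     elif n == 2:
--         return 2 % q
--     else:
--         for i in range(2, n):
--             fibs.append((fibs[i - 2] + fibs[i - 1]) % q)
--         return fibs[len(fibs) - 1]
-- ===== SOURCE B (Python) =====
-- def ladder_with_modulo(n, q):
--     # fast-doubling Fibonacci: F(1)=1, F(2)=2 means answer = Fib(n+1) mod q
--     if n == 1:
--         return 1
--
--     def pair(k):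
--         # returns (Fib(k) % q, Fib(k+1) % q) with Fib(0)=0, Fib(1)=1
--         if k == 0:
--             return (0, 1 % q)
--         a, b = pair(k // 2)
--         c = a * (2 * b - a) % q
--         d = (a * a + b * b) % q
--         if k % 2 == 0:
--             return (c, d)
--         return (d, (c + d) % q)
--
--     return pair(n + 1)[0]
-- ===== Notes on version B (the rewrite author's own statement) =====
-- stated objective: faster
-- what changed: Replaces the O(n) list-building loop with recursive fast-doubling Fibonacci modulo q (O(log n) multiplications).
-- outside the precondition, e.g. on ladder_with_modulo(0, 5): A returns 2, B returns 1; on ladder_with_modulo(-2, 5): A returns 2, B raises RecursionError; on ladder_with_modulo(2, 0): A raises ZeroDivisionError, B raises ZeroDivisionError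
import Mathlib
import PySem

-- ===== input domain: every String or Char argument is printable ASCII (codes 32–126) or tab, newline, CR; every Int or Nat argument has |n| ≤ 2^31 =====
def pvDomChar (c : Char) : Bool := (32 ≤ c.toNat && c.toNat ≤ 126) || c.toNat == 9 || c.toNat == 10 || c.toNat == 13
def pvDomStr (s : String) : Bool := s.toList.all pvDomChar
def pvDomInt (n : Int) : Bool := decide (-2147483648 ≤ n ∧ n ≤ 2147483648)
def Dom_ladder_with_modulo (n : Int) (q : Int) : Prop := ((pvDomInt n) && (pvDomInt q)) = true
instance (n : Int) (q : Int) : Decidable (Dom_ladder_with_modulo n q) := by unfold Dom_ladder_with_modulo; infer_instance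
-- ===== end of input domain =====

-- B replaces A's O(n) list-building loop by recursive fast-doubling Fibonacci mod q (measured faster, asymptotic change).


-- ===== PORT A =====
def ladder_with_modulo (n : Int) (q : Int) : Int :=
  let fibs : List Int := [1, 2]
  if n = 1 then 1
  else if n = 2 then PySem.Int.mod 2 q
  else
    let fibs2 := (PySem.List.pyRange 2 n 1).foldl
      (fun fibs i =>
        fibs ++ [PySem.Int.mod (PySem.List.pyGetD fibs (i - 2) 0 + PySem.List.pyGetD fibs (i - 1) 0) q])
      fibs
    PySem.List.pyGetD fibs2 (PySem.List.len fibs2 - 1) 0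

-- ===== PORT B =====
-- pair(k) of Source B: (Fib(k) % q, Fib(k+1) % q) by fast doubling
def fibPairB (q : Int) : Nat → Int × Int
  | 0 => (0, PySem.Int.mod 1 q)
  | (k+1) =>
    let p := fibPairB q ((k+1)/2)
    let a := p.1
    let b := p.2
    let c := PySem.Int.mod (a * (2 * b - a)) q
    let d := PySem.Int.mod (a * a + b * b) q
    if (k+1) % 2 = 0 then (c, d) else (d, PySem.Int.mod (c + d) q)
decreasing_by exact Nat.div_lt_self (Nat.succ_pos k) (by omega)

def ladder_with_modulo_alt (n : Int) (q : Int) : Int :=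
  if n = 1 then 1 else (fibPairB q (n + 1).toNat).1

-- ===== PRECONDITION & SPEC =====
-- Pre_ restricts to the natural stairs domain n ≥ 1 (for n ≤ 0 A returns 2, leftover initial list state never
-- reduced mod q, where B's fast-doubling recursion does not apply) and excludes q = 0 when n ≥ 2, where A
-- raises ZeroDivisionError (so does B).
def Pre_ladder_with_modulo (n : Int) (q : Int) : Prop := 1 ≤ n ∧ (q ≠ 0 ∨ n = 1)
instance (n : Int) (q : Int) : Decidable (Pre_ladder_with_modulo n q) := by unfold Pre_ladder_with_modulo; infer_instance
def pvWitness_ladder_with_modulo : Int × Int := (5, 3)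
def Spec_ladder_with_modulo (n : Int) (q : Int) (out : Int) : Prop := out = ladder_with_modulo_alt n q
instance (n : Int) (q : Int) (out : Int) : Decidable (Spec_ladder_with_modulo n q out) := by unfold Spec_ladder_with_modulo; infer_instance

-- ===== CLAIM (what is proved, stated in full; the proofs are below) =====
def Claim_equal_ladder_with_modulo : Prop := ∀ (n : Int) (q : Int), Dom_ladder_with_modulo n q → Pre_ladder_with_modulo n q → Spec_ladder_with_modulo n q (ladder_with_modulo n q)

-- ===== LEMMAS AND PROOFS =====

-- congruent integers have the same Python mod
lemma pmod_congr (q x y : Int) (h : Int.ModEq q x y) : PySem.Int.mod x q = PySem.Int.mod y q := by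
  have hx := PySem.Int.floordiv_mul_add_mod x q
  have hy := PySem.Int.floordiv_mul_add_mod y q
  obtain ⟨k, hk⟩ := Int.ModEq.dvd h
  have hd : q ∣ PySem.Int.mod x q - PySem.Int.mod y q :=
    ⟨PySem.Int.floordiv y q - PySem.Int.floordiv x q - k, by linear_combination hx - hy - hk⟩
  rcases lt_trichotomy q 0 with hq | hq | hq
  · have b1 := PySem.Int.mod_neg_bounds x hq
    have b2 := PySem.Int.mod_neg_bounds y hq
    have habs : |PySem.Int.mod x q - PySem.Int.mod y q| < -q := abs_lt.mpr ⟨by omega, by omega⟩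
    have := Int.eq_zero_of_abs_lt_dvd ((Int.neg_dvd).mpr hd) habs
    omega
  · subst hq
    have := Int.zero_dvd.mp hd
    omega
  · have b1 := PySem.Int.mod_nonneg x hq
    have b2 := PySem.Int.mod_lt x hq
    have b3 := PySem.Int.mod_nonneg y hq
    have b4 := PySem.Int.mod_lt y hq
    have habs : |PySem.Int.mod x q - PySem.Int.mod y q| < q := abs_lt.mpr ⟨by omega, by omega⟩
    have := Int.eq_zero_of_abs_lt_dvd hd habs
    omega

-- PySem.Int.mod x q is congruent to x
lemma pmod_modeq (q x : Int) : Int.ModEq q (PySem.Int.mod x q) x := by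
  have hx := PySem.Int.floordiv_mul_add_mod x q
  rw [Int.modEq_iff_dvd]
  exact ⟨PySem.Int.floordiv x q, by linear_combination -hx⟩

-- cast fast-doubling identities
lemma fib_two_mul_int (m : Nat) :
    ((Nat.fib (2*m) : Int)) = (Nat.fib m : Int) * (2 * (Nat.fib (m+1) : Int) - (Nat.fib m : Int)) := by
  have hle : Nat.fib m ≤ 2 * Nat.fib (m+1) :=
    le_trans Nat.fib_le_fib_succ (by omega)
  rw [Nat.fib_two_mul, Nat.cast_mul, Nat.cast_sub hle]
  push_cast
  ring

lemma fib_two_mul_add_one_int (m : Nat) :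
    ((Nat.fib (2*m+1) : Int)) = (Nat.fib m : Int) * (Nat.fib m : Int) + (Nat.fib (m+1) : Int) * (Nat.fib (m+1) : Int) := by
  rw [Nat.fib_two_mul_add_one]
  push_cast
  ring

lemma fib_add_two_int (m : Nat) :
    ((Nat.fib (m+2) : Int)) = (Nat.fib m : Int) + (Nat.fib (m+1) : Int) := by
  rw [Nat.fib_add_two]
  push_cast
  ring

-- fast doubling computes Fibonacci mod q
lemma fibPairB_eq (q : Int) :
    ∀ k : Nat, fibPairB q k = (PySem.Int.mod (Nat.fib k) q, PySem.Int.mod (Nat.fib (k+1)) q) := by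
  intro k
  induction k using Nat.strong_induction_on with
  | _ k ih =>
    match k with
    | 0 =>
      rw [fibPairB]
      simp [PySem.Int.mod]
    | (k+1) =>
      rw [fibPairB]
      have hlt : (k+1)/2 < k+1 := Nat.div_lt_self (Nat.succ_pos k) (by omega)
      rw [ih _ hlt]
      dsimp only
      set m := (k+1)/2 with hm
      set A := PySem.Int.mod (Nat.fib m) q with hA'
      set B := PySem.Int.mod (Nat.fib (m+1)) q with hB'
      have hA : Int.ModEq q A (Nat.fib m) := pmod_modeq q _
      have hB : Int.ModEq q B (Nat.fib (m+1)) := pmod_modeq q _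
      have hcm : Int.ModEq q (A * (2 * B - A)) (Nat.fib (2*m)) := by
        rw [fib_two_mul_int]
        exact hA.mul ((hB.mul_left 2).sub hA)
      have hdm : Int.ModEq q (A * A + B * B) (Nat.fib (2*m+1)) := by
        rw [fib_two_mul_add_one_int]
        exact (hA.mul hA).add (hB.mul hB)
      by_cases hp : (k+1) % 2 = 0
      · have e1 : k+1 = 2*m := by omega
        rw [if_pos hp, e1]
        exact Prod.ext (pmod_congr q _ _ hcm) (pmod_congr q _ _ hdm)
      · have e1 : k+1 = 2*m+1 := by omega
        rw [if_neg hp, e1]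
        refine Prod.ext (pmod_congr q _ _ hdm) ?_
        have hsum : Int.ModEq q (PySem.Int.mod (A * (2 * B - A)) q + PySem.Int.mod (A * A + B * B) q)
            (Nat.fib (2*m+1+1)) := by
          have h2 : (2*m)+2 = 2*m+1+1 := by omega
          rw [← h2, fib_add_two_int]
          exact ((pmod_modeq q _).trans hcm).add ((pmod_modeq q _).trans hdm)
        exact pmod_congr q _ _ hsum

-- the value sequence A's loop appends
def gA (q : Int) : Nat → Int
  | 0 => 1
  | 1 => 2
  | (k+2) => PySem.Int.mod (gA q k + gA q (k+1)) q

lemma gA_modeq (q : Int) : ∀ j : Nat, Int.ModEq q (gA q j) (Nat.fib (j+2)) := by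
  intro j
  induction j using Nat.strong_induction_on with
  | _ j ih =>
    match j with
    | 0 =>
      have h2 : (Nat.fib 2 : Int) = 1 := by decide
      rw [gA, h2]
    | 1 =>
      have h3 : (Nat.fib 3 : Int) = 2 := by decide
      rw [gA, h3]
    | (j+2) =>
      have h1 := ih j (by omega)
      have h2 := ih (j+1) (by omega)
      have hsum : Int.ModEq q (gA q j + gA q (j+1)) (Nat.fib (j+2+2)) := by
        rw [fib_add_two_int (j+2)]
        have e : j+1+2 = j+2+1 := by omega
        rw [e] at h2
        exact h1.add h2
      rw [gA]
      exact (pmod_modeq q _).trans hsum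

-- A's loop builds exactly the gA-sequence
lemma loopA (q : Int) : ∀ m : Nat, 2 ≤ m →
    (PySem.List.pyRange 2 (m : Int) 1).foldl
      (fun fibs i =>
        fibs ++ [PySem.Int.mod (PySem.List.pyGetD fibs (i - 2) 0 + PySem.List.pyGetD fibs (i - 1) 0) q])
      [1, 2]
    = (List.range m).map (gA q) := by
  intro m
  induction m with
  | zero => omega
  | succ m ihm =>
    intro hm
    by_cases hlt : m < 2
    · have e : m = 1 := by omega
      subst e
      rw [show ((2:Nat) : Int) = 2 by norm_num, PySem.List.pyRange_one_eq_nil (by norm_num)]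
      simp [List.range_succ, gA]
    · have hm2 : 2 ≤ m := by omega
      have hcast : ((m+1 : Nat) : Int) = (m : Int) + 1 := by push_cast; ring
      rw [hcast, PySem.List.pyRange_one_succ_right (by exact_mod_cast hm2), List.foldl_append, ihm hm2]
      simp only [List.foldl_cons, List.foldl_nil]
      have e1 : (m : Int) - 2 = ((m - 2 : Nat) : Int) := by omega
      have e2 : (m : Int) - 1 = ((m - 1 : Nat) : Int) := by omega
      have g1 : (List.map (gA q) (List.range m)).getD (m-2) 0 = gA q (m-2) := by
        rw [List.getD_eq_getElem _ _ (by simp; omega)]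
        simp
      have g2 : (List.map (gA q) (List.range m)).getD (m-1) 0 = gA q (m-1) := by
        rw [List.getD_eq_getElem _ _ (by simp; omega)]
        simp
      rw [e1, e2, PySem.List.pyGetD_natCast, PySem.List.pyGetD_natCast, g1, g2]
      have hg : PySem.Int.mod (gA q (m-2) + gA q (m-1)) q = gA q m := by
        have em : m = m - 2 + 2 := by omega
        conv_rhs => rw [em]
        rw [gA, show m - 2 + 1 = m - 1 from by omega]
      rw [hg, List.range_succ, List.map_append]
      simp

-- gA at index ≥ 2 is Fibonacci mod q
lemma gA_eq_mod_fib (q : Int) (j : Nat) (hj : 2 ≤ j) :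
    gA q j = PySem.Int.mod (Nat.fib (j+2)) q := by
  obtain ⟨i, rfl⟩ : ∃ i, j = i + 2 := ⟨j - 2, by omega⟩
  rw [gA]
  refine pmod_congr q _ _ ?_
  rw [fib_add_two_int (i+2)]
  have h2 := gA_modeq q (i+1)
  have e : i+1+2 = i+2+1 := by omega
  rw [e] at h2
  exact (gA_modeq q i).add h2

-- ===== VERDICT (by name: the statement is the Claim_ definition above) =====
theorem ladder_with_modulo_spec : Claim_equal_ladder_with_modulo := by
  intro n q _ hpre
  unfold Spec_ladder_with_modulo
  obtain ⟨hn, hq⟩ := hpre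
  by_cases h1 : n = 1
  · simp [ladder_with_modulo, ladder_with_modulo_alt, h1]
  · by_cases h2 : n = 2
    · subst h2
      rw [ladder_with_modulo, ladder_with_modulo_alt]
      dsimp only
      rw [if_neg h1, if_pos rfl, if_neg h1]
      rw [show ((2:Int)+1).toNat = 3 from by decide, fibPairB_eq q 3]
      rw [show (Nat.fib 3 : Int) = 2 from by decide]
    · have hn3 : 3 ≤ n := by omega
      have hm : ((n.toNat : Nat) : Int) = n := Int.toNat_of_nonneg (by omega)
      set m := n.toNat with hmdef
      have hm3 : 3 ≤ m := by omega
      rw [ladder_with_modulo, ladder_with_modulo_alt]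
      dsimp only
      rw [if_neg h1, if_neg h2, if_neg h1]
      rw [← hm, loopA q m (by omega)]
      have hlen : PySem.List.len (List.map (gA q) (List.range m)) = (m : Int) := by
        simp [PySem.List.len_eq]
      rw [hlen]
      have e1 : (m : Int) - 1 = ((m - 1 : Nat) : Int) := by omega
      have g1 : (List.map (gA q) (List.range m)).getD (m-1) 0 = gA q (m-1) := by
        rw [List.getD_eq_getElem _ _ (by simp; omega)]
        simp
      rw [e1, PySem.List.pyGetD_natCast, g1]
      have hB : ((m : Int) + 1).toNat = m + 1 := by omega
      rw [hB, fibPairB_eq q (m+1)]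
      rw [gA_eq_mod_fib q (m-1) (by omega)]
      have e2 : m - 1 + 2 = m + 1 := by omega
      rw [e2]
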